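-- pv_equiv track=rewrite | github.com/prabhavithreddy/Python_AI_ML | Edureka/PGP AIML/1_Python for AIML/1_PythonBasics/string_permutations.py | get_permutations1
-- ===== SOURCE A (Python) =====
-- def get_permutations1(word):
--     l = []
--     for i in range(len(word)):
--         for j in range(len(word)):
--             for k in range(len(word)):
--                 if i != j and j != k and i != k:
--                     l.append(word[i]+word[j]+word[k])
--     return l
-- ===== SOURCE B (Python) =====
-- def get_permutations1(word):
--     def pick(chars, r):
--         if r == 1:
--             return [chars[i] for i in range(len(chars))]
--         return [chars[i] + rest
--                 for i in range(len(chars))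
--                 for rest in pick(chars[:i] + chars[i+1:], r - 1)]
--     return pick(word, 3)
-- ===== Notes on version B (the rewrite author's own statement) =====
-- stated objective: alternative
-- what changed: Replaces the n^3 triple index loop with distinctness filter by a recursive pick-one-and-remove generator (the itertools.permutations algorithm) that only ever builds valid ordered triples.
import Mathlib
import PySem

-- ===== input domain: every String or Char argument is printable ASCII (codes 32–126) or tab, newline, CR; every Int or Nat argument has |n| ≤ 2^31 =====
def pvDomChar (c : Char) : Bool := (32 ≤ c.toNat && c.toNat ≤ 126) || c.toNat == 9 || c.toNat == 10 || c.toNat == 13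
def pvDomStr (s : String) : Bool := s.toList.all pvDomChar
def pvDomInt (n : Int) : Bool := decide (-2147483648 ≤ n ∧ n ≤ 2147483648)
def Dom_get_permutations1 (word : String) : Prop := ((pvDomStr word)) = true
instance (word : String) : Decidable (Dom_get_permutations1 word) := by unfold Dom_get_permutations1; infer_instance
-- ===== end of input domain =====

-- B replaces A's filtered triple index loop by a recursive pick-one-and-remove generator; alternative decomposition, same output.

-- ===== PORT A =====
-- triple loop over range(len(word)) appending word[i]+word[j]+word[k] when the indices are pairwise distinct
def get_permutations1 (word : String) : List String :=
  let cs := word.toList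
  let n : Int := PySem.Str.len word
  (PySem.List.pyRange 0 n 1).foldl (fun l i =>
    (PySem.List.pyRange 0 n 1).foldl (fun l j =>
      (PySem.List.pyRange 0 n 1).foldl (fun l k =>
        if i ≠ j ∧ j ≠ k ∧ i ≠ k then
          l ++ [String.ofList [PySem.List.pyGetD cs i ' ', PySem.List.pyGetD cs j ' ', PySem.List.pyGetD cs k ' ']]
        else l) l) l) []

-- ===== PORT B =====
-- Source B's pick(chars, r): for r = 1 the list [chars[i] for i in range(len(chars))], else chars[i] + rest
-- for every index i and every rest from pick(chars[:i] + chars[i+1:], r-1).  Strings are modelled as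
-- List Char (PySem convention); 'match cs[i]?' is Python's indexing chars[i], always in range here since
-- i < len(chars).  pick is only ever called with r = 3, 2, 1, so the Nat pattern r = 0 is unreachable
-- from the entry point; it is given the vacuous value [].
def pickPerm {α : Type} (cs : List α) (r : Nat) : List (List α) :=
  match r with
  | 0 => []
  | 1 =>
    (List.range cs.length).flatMap (fun (i : Nat) =>
      match cs[i]? with
      | none => []
      | some c => [[c]])
  | r' + 2 =>
    (List.range cs.length).flatMap (fun (i : Nat) =>
      match cs[i]? with
      | none => []
      | some c =>
        (pickPerm (PySem.List.slice cs none (some (i : Int)) ++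
                   PySem.List.slice cs (some ((i : Int) + 1)) none) (r' + 1)).map (fun rest => c :: rest))

def get_permutations1_alt (word : String) : List String :=
  (pickPerm word.toList 3).map String.ofList

-- ===== PRECONDITION & SPEC =====
def Spec_get_permutations1 (word : String) (out : List String) : Prop := out = get_permutations1_alt word
instance (word : String) (out : List String) : Decidable (Spec_get_permutations1 word out) := by unfold Spec_get_permutations1; infer_instance

-- ===== CLAIM (what is proved, stated in full; the proofs are below) =====
def Claim_equal_get_permutations1 : Prop := ∀ (word : String), Dom_get_permutations1 word → Spec_get_permutations1 word (get_permutations1 word)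

-- ===== LEMMAS AND PROOFS =====

-- the slice pair chars[:i] + chars[i+1:] is eraseIdx
theorem pickPerm_succ {α : Type} (cs : List α) (r : Nat) :
    pickPerm cs (r + 2) =
      (List.range cs.length).flatMap (fun i =>
        match cs[i]? with
        | none => []
        | some c => (pickPerm (cs.eraseIdx i) (r + 1)).map (fun rest => c :: rest)) := by
  simp only [pickPerm]
  apply List.flatMap_congr
  intro i _
  have h1 : PySem.List.slice cs none (some (i : Int)) = cs.take i := by
    rw [PySem.List.slice_to cs (Int.natCast_nonneg i)]; simp
  have h2 : PySem.List.slice cs (some ((i : Int) + 1)) none = cs.drop (i + 1) := by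
    rw [PySem.List.slice_from cs (by omega : (0:Int) ≤ (i : Int) + 1)]
    norm_num
  rw [h1, h2, ← List.eraseIdx_eq_take_drop_succ]

-- flatMap over range with in-range lookup is flatMap over the list itself
theorem flatMap_range_getElem? {α β : Type} (ms : List α) (H : α → List β) :
    (List.range ms.length).flatMap (fun i =>
        match ms[i]? with
        | none => []
        | some c => H c) = ms.flatMap H := by
  induction ms with
  | nil => simp
  | cons x t ih =>
    rw [List.length_cons, List.range_succ_eq_map, List.flatMap_cons, List.flatMap_map]
    simp only [List.getElem?_cons_succ, Nat.succ_eq_add_one]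
    rw [List.flatMap_cons]
    simp only [List.getElem?_cons_zero]
    exact congrArg _ ih

-- pick of one is the list of singletons
theorem pickPerm_one {α : Type} (cs : List α) :
    pickPerm cs 1 = cs.map (fun c => [c]) := by
  show (List.range cs.length).flatMap _ = _
  rw [flatMap_range_getElem? cs (fun c => [[c]])]
  induction cs with
  | nil => rfl
  | cons x t ih => rw [List.flatMap_cons, List.map_cons, ih]; rfl

-- pickPerm is index-structural: it commutes with mapping the elements
theorem pickPerm_map {α β : Type} (f : α → β) (r : Nat) (ms : List α) :
    pickPerm (ms.map f) r = (pickPerm ms r).map (List.map f) := by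
  induction r using Nat.twoStepInduction generalizing ms with
  | zero => simp [pickPerm]
  | one => rw [pickPerm_one, pickPerm_one]; simp
  | more r _ ih =>
    rw [pickPerm_succ, pickPerm_succ, List.map_flatMap, List.length_map]
    apply List.flatMap_congr
    intro i _
    rw [List.getElem?_map]
    cases ms[i]? with
    | none => simp
    | some c => simp [List.eraseIdx_map, ih]

-- on a duplicate-free list, removing position i is removing the value at i
theorem pickPerm_nodup (ms : List Nat) (h : ms.Nodup) (r : Nat) :
    pickPerm ms (r + 2) =
      ms.flatMap (fun x => (pickPerm (ms.filter (fun y => y != x)) (r + 1)).map (fun rest => x :: rest)) := by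
  rw [pickPerm_succ,
      ← flatMap_range_getElem? ms (fun x => (pickPerm (ms.filter (fun y => y != x)) (r + 1)).map (fun rest => x :: rest))]
  apply List.flatMap_congr
  intro i hi
  have hi' : i < ms.length := List.mem_range.mp hi
  rw [List.getElem?_eq_getElem hi']
  have := h.erase_getElem i hi'
  rw [List.Nodup.erase_eq_filter h] at this
  simp only [this]

-- drop elements on which F is empty before flat-mapping
theorem flatMap_eq_filter_flatMap {α β : Type} (p : α → Bool) (F : α → List β) (l : List α)
    (h : ∀ x ∈ l, p x = false → F x = []) : l.flatMap F = (l.filter p).flatMap F := by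
  induction l with
  | nil => simp
  | cons x t ih =>
    rw [List.flatMap_cons, List.filter_cons]
    by_cases hp : p x = true
    · rw [if_pos hp, List.flatMap_cons, ih (fun y hy => h y (List.mem_cons_of_mem x hy))]
    · rw [if_neg hp, h x (List.mem_cons_self) (Bool.eq_false_iff.mpr hp),
          ih (fun y hy => h y (List.mem_cons_of_mem x hy)), List.nil_append]

-- a list is the getD-image of its index range
theorem map_getD_range_self {α : Type} (cs : List α) (d : α) :
    (List.range cs.length).map (fun t => cs.getD t d) = cs := by
  apply List.ext_getElem
  · simp
  · intro i h1 h2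
    simp [List.getD_eq_getElem?_getD, List.getElem?_eq_getElem h2]

-- A reduced to a nested flatMap/filter over Nat index ranges
theorem A_norm (word : String) :
    get_permutations1 word =
      (List.range word.toList.length).flatMap (fun i =>
        (List.range word.toList.length).flatMap (fun j =>
          ((List.range word.toList.length).filter
              (fun k => decide (i ≠ j) && (decide (j ≠ k) && decide (i ≠ k)))).map
            (fun k => String.ofList [word.toList.getD i ' ', word.toList.getD j ' ', word.toList.getD k ' ']))) := by
  have hinner : ∀ (i j : Int) (l : List String),
      (PySem.List.pyRange 0 (PySem.Str.len word) 1).foldl (fun l k =>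
        if i ≠ j ∧ j ≠ k ∧ i ≠ k then
          l ++ [String.ofList [PySem.List.pyGetD word.toList i ' ', PySem.List.pyGetD word.toList j ' ',
                               PySem.List.pyGetD word.toList k ' ']]
        else l) l =
      l ++ ((PySem.List.pyRange 0 (PySem.Str.len word) 1).filter
              (fun k => decide (i ≠ j) && (decide (j ≠ k) && decide (i ≠ k)))).map
            (fun k => String.ofList [PySem.List.pyGetD word.toList i ' ', PySem.List.pyGetD word.toList j ' ',
                                     PySem.List.pyGetD word.toList k ' ']) := by
    intro i j l
    have hfun : (fun (l : List String) (k : Int) =>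
        if i ≠ j ∧ j ≠ k ∧ i ≠ k then
          l ++ [String.ofList [PySem.List.pyGetD word.toList i ' ', PySem.List.pyGetD word.toList j ' ',
                               PySem.List.pyGetD word.toList k ' ']]
        else l) =
        (fun (l : List String) (k : Int) =>
          if (decide (i ≠ j) && (decide (j ≠ k) && decide (i ≠ k))) = true then
            l ++ [String.ofList [PySem.List.pyGetD word.toList i ' ', PySem.List.pyGetD word.toList j ' ',
                                 PySem.List.pyGetD word.toList k ' ']]
          else l) := by
      funext l k
      by_cases h : i ≠ j ∧ j ≠ k ∧ i ≠ k
      · simp [h]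
      · simp [if_neg h]
    rw [hfun, PySem.List.foldl_append_if]
  simp only [get_permutations1, hinner]
  simp only [PySem.List.foldl_append_eq_flatMap, List.nil_append]
  have hn : PySem.Str.len word = (word.toList.length : Int) := PySem.Str.len_eq word
  rw [hn, PySem.List.pyRange_zero_nat]
  rw [List.flatMap_map]
  apply List.flatMap_congr; intro i _
  rw [List.flatMap_map]
  apply List.flatMap_congr; intro j _
  rw [List.filter_map, List.map_map]
  have hpred : ∀ k ∈ List.range word.toList.length,
      ((fun k => decide ((i : Int) ≠ (j : Int)) && (decide ((j : Int) ≠ k) && decide ((i : Int) ≠ k))) ∘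
        (fun (k : Nat) => (k : Int))) k
        = (fun k => decide (i ≠ j) && (decide (j ≠ k) && decide (i ≠ k))) k := by
    intro k _
    simp [Function.comp]
  rw [List.filter_congr hpred]
  apply List.map_congr_left
  intro k _
  simp [Function.comp]

-- ===== VERDICT (by name: the statement is the Claim_ definition above) =====
theorem get_permutations1_spec : Claim_equal_get_permutations1 := by
  intro word _
  show get_permutations1 word = get_permutations1_alt word
  -- B side: pull the elements out, leaving pickPerm on the duplicate-free index range
  have hB : get_permutations1_alt word =
      (pickPerm (List.range word.toList.length) 3).map
        (fun p => String.ofList (p.map (fun t => word.toList.getD t ' '))) := by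
    have h := pickPerm_map (fun t => word.toList.getD t ' ') 3 (List.range word.toList.length)
    rw [map_getD_range_self] at h
    unfold get_permutations1_alt
    rw [h, List.map_map]
    rfl
  rw [A_norm, hB]
  -- unfold pickPerm on the nodup range via two pick-and-remove steps and the singleton base
  have hnd : (List.range word.toList.length).Nodup := List.nodup_range
  rw [show (3 : Nat) = 1 + 2 from rfl, pickPerm_nodup _ hnd, List.map_flatMap]
  apply List.flatMap_congr
  intro i hi
  rw [show (1 + 1 : Nat) = 0 + 2 from rfl, pickPerm_nodup _ (hnd.filter _), List.map_flatMap, List.map_flatMap]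
  -- A's middle loop contributes nothing when j = i
  rw [flatMap_eq_filter_flatMap (fun y => y != i) _ _ ?hside]
  case hside =>
    intro j _ hj
    have : j = i := by simpa using hj
    subst this
    simp
  apply List.flatMap_congr
  intro j hj
  have hji : j ≠ i := by simpa using (List.of_mem_filter hj)
  rw [show (0 + 1 : Nat) = 1 from rfl, pickPerm_one, List.filter_filter]
  rw [show ((List.range word.toList.length).filter fun k => decide (i ≠ j) && (decide (j ≠ k) && decide (i ≠ k)))
        = ((List.range word.toList.length).filter fun k => (k != j) && (k != i)) from
      List.filter_congr (by
        intro k _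
        have hij : i ≠ j := fun h => hji h.symm
        by_cases hk1 : k = i
        · subst hk1; simp [hij, bne]
        · by_cases hk2 : k = j
          · subst hk2; simp [hij, bne]
          · simp [hij, hk1, hk2, Ne.symm hk1, Ne.symm hk2, bne])]
  simp only [List.map_map]
  apply List.map_congr_left
  intro k _
  simp [Function.comp]
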